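-- pv_equiv track=rewrite | github.com/ashokonmi3/mypython | 08_sublist_problem.py | find_shortest_longest_sublists
-- ===== SOURCE A (Python) =====
-- def find_shortest_longest_sublists(lst, N):
--     """
--     Finds all sublists that:
--     - start with N
--     - end with N
--     - have no N in between
--     Returns the shortest and longest such sublists.
--     """
--
--     sublists = []  # This will store all valid sublists we find
--
--     # Loop over the list to find starting positions where value == N
--     for start in range(len(lst)):
--         if lst[start] == N:
--             # From each valid start position, look for an end position
--             for end in range(start + 1, len(lst)):
--                 if lst[end] == N:
--                     # Check if N appears between start+1 and end-1
--                     # We want no N between start and end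
--                     if N not in lst[start + 1:end]:
--                         # If valid, add the sublist (including end) to our list
--                         sublists.append(lst[start:end + 1])
--
--     # If no valid sublists were found, return empty lists
--     if not sublists:
--         return [], []
--
--     # Find the shortest sublist using min + length as key
--     shortest = min(sublists, key=len)
--
--     # Find the longest sublist using max + length as key
--     longest = max(sublists, key=len)
--
--     # Return both sublists
--     return shortest, longest
-- ===== SOURCE B (Python) =====
-- def find_shortest_longest_sublists(lst, N):
--     # Collect the positions of N in one pass; each adjacent pair of positions
--     # bounds exactly one valid sublist, so pick the pairs with the smallest and
--     # largest gap (first occurrence wins ties) and slice only at the end.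
--     positions = []
--     i = -1
--     while True:
--         try:
--             i = lst.index(N, i + 1)
--         except ValueError:
--             break
--         positions.append(i)
--     pairs = list(zip(positions, positions[1:]))
--     shortest = longest = None
--     for a, b in pairs:
--         if shortest is None or b - a < shortest[1] - shortest[0]:
--             shortest = (a, b)
--         if longest is None or longest[1] - longest[0] < b - a:
--             longest = (a, b)
--     if shortest is None:
--         return [], []
--     return lst[shortest[0]:shortest[1] + 1], lst[longest[0]:longest[1] + 1]
-- ===== Notes on version B (the rewrite author's own statement) =====
-- stated objective: alternative
-- what changed: Replaces the triple nested scan (every start x every end x a slice membership test) by collecting the positions of N once via list.index and taking the min/max gap over adjacent position pairs, slicing only twice at the end.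
import Mathlib
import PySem

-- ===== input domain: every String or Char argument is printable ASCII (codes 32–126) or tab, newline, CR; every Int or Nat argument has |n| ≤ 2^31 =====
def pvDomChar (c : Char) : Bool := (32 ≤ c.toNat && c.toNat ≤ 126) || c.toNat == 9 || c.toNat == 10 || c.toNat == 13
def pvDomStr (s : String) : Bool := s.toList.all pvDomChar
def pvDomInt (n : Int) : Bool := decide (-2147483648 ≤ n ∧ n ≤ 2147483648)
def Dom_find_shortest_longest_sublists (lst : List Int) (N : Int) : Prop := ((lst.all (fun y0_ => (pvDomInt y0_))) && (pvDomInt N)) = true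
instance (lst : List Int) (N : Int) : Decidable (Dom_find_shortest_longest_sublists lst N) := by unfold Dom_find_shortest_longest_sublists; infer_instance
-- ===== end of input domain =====

-- B replaces A's triple nested scan by collecting the positions of N once (list.index)
-- and taking min/max gaps over adjacent position pairs (a single-pass alternative algorithm
-- with far less rescanning); return value only, no argument is mutated.
-- ===== PORT A =====
def find_shortest_longest_sublists (lst : List Int) (N : Int) : List Int × List Int :=
  let n : Int := lst.length
  let sublists : List (List Int) :=
    (PySem.List.pyRange 0 n 1).foldl (fun acc start =>
      if PySem.List.pyGetD lst start 0 = N then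
        (PySem.List.pyRange (start + 1) n 1).foldl (fun acc2 e =>
          if PySem.List.pyGetD lst e 0 = N then
            if N ∉ PySem.List.slice lst (some (start + 1)) (some e) then
              acc2 ++ [PySem.List.slice lst (some start) (some (e + 1))]
            else acc2
          else acc2) acc
      else acc) []
  if sublists.isEmpty then ([], [])
  else ((PySem.List.min? sublists List.length).getD [],
        (PySem.List.max? sublists List.length).getD [])

-- ===== PORT B =====
-- lst.index(v, start) has no PySem primitive with a start argument; hand-ported:
-- first index ≥ start holding v, none = ValueError. Exact for 0 ≤ start (the only use).
def pvIndexFrom (xs : List Int) (v : Int) (start : Nat) : Option Nat :=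
  (List.idxOf? v (xs.drop start)).map (fun k => start + k)

-- B's `while True: i = lst.index(N, i+1) … positions.append(i)` loop; fuel-bounded
-- structural recursion (each found index is larger than the last, so length+1 fuel suffices).
def pvCollect (lst : List Int) (N : Int) : Nat → Int → List Int
  | 0, _ => []
  | fuel + 1, i =>
    match pvIndexFrom lst N (i + 1).toNat with
    | none => []
    | some j => (j : Int) :: pvCollect lst N fuel (j : Int)

def find_shortest_longest_sublists_alt (lst : List Int) (N : Int) : List Int × List Int :=
  let positions : List Int := pvCollect lst N (lst.length + 1) (-1)
  let pairs : List (Int × Int) := positions.zip (PySem.List.slice positions (some 1) none)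
  let r : Option (Int × Int) × Option (Int × Int) :=
    pairs.foldl (fun acc p =>
      ((match acc.1 with
        | none => some p
        | some m => if p.2 - p.1 < m.2 - m.1 then some p else some m),
       (match acc.2 with
        | none => some p
        | some m => if m.2 - m.1 < p.2 - p.1 then some p else some m))) (none, none)
  match r.1, r.2 with
  | some s, some l =>
      (PySem.List.slice lst (some s.1) (some (s.2 + 1)),
       PySem.List.slice lst (some l.1) (some (l.2 + 1)))
  | _, _ => ([], [])

-- ===== PRECONDITION & SPEC =====
def Spec_find_shortest_longest_sublists (lst : List Int) (N : Int) (out : List Int × List Int) : Prop := out = find_shortest_longest_sublists_alt lst N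
instance (lst : List Int) (N : Int) (out : List Int × List Int) : Decidable (Spec_find_shortest_longest_sublists lst N out) := by unfold Spec_find_shortest_longest_sublists; infer_instance

-- ===== CLAIM (what is proved, stated in full; the proofs are below) =====
def Claim_equal_find_shortest_longest_sublists : Prop := ∀ (lst : List Int) (N : Int), Dom_find_shortest_longest_sublists lst N → Spec_find_shortest_longest_sublists lst N (find_shortest_longest_sublists lst N)

-- ===== LEMMAS AND PROOFS =====

-- `pvT lst N a`: the positions ≥ a (as Ints) at which lst holds N, ascending.
def pvT (lst : List Int) (N : Int) (a : Int) : List Int :=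
  (PySem.List.pyRange a lst.length 1).filter (fun e => decide (PySem.List.pyGetD lst e 0 = N))

lemma pv_slice_map (lst : List Int) (a b : Int) (ha : 0 ≤ a) (hab : a ≤ b)
    (hb : b ≤ (lst.length : Int)) :
    PySem.List.slice lst (some a) (some b)
      = (PySem.List.pyRange a b 1).map (fun j => PySem.List.pyGetD lst j 0) := by
  have h0b : 0 ≤ b := le_trans ha hab
  have hsplit := PySem.List.pyRange_one_append a b (lst.length : Int) hab hb
  have hm1 : (PySem.List.pyRange a (lst.length : Int) 1).map (fun j => PySem.List.pyGetD lst j 0)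
      = lst.drop a.toNat := PySem.List.map_pyGetD_pyRange lst 0 ha
  have hm2 : (PySem.List.pyRange b (lst.length : Int) 1).map (fun j => PySem.List.pyGetD lst j 0)
      = lst.drop b.toNat := PySem.List.map_pyGetD_pyRange lst 0 h0b
  have e1 : (PySem.List.pyRange a b 1).map (fun j => PySem.List.pyGetD lst j 0) ++ lst.drop b.toNat
      = lst.drop a.toNat := by
    rw [← hm2, ← List.map_append, ← hsplit, hm1]
  have e2 : PySem.List.slice lst (some a) (some b) ++ lst.drop b.toNat = lst.drop a.toNat := by
    rw [PySem.List.slice_toNat lst ha h0b]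
    conv_rhs => rw [← List.take_append_drop (b.toNat - a.toNat) (lst.drop a.toNat)]
    rw [List.drop_drop]
    congr 2
    omega
  exact List.append_cancel_right (e2.trans e1.symm)

lemma pv_mem_slice (lst : List Int) (N a b : Int) (ha : 0 ≤ a) (hab : a ≤ b)
    (hb : b ≤ (lst.length : Int)) :
    N ∈ PySem.List.slice lst (some a) (some b)
      ↔ ∃ j, a ≤ j ∧ j < b ∧ PySem.List.pyGetD lst j 0 = N := by
  rw [pv_slice_map lst a b ha hab hb]
  simp only [List.mem_map, PySem.List.mem_pyRange_one]
  constructor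
  · rintro ⟨j, ⟨hj1, hj2⟩, hj3⟩; exact ⟨j, hj1, hj2, hj3⟩
  · rintro ⟨j, hj1, hj2, hj3⟩; exact ⟨j, ⟨hj1, hj2⟩, hj3⟩

lemma pvT_mem (lst : List Int) (N a s : Int) (hs : s ∈ pvT lst N a) :
    a ≤ s ∧ s < (lst.length : Int) ∧ PySem.List.pyGetD lst s 0 = N := by
  have := hs
  simp only [pvT, List.mem_filter, PySem.List.mem_pyRange_one, decide_eq_true_eq] at this
  exact ⟨this.1.1, this.1.2, this.2⟩

lemma pvT_eq_nil (lst : List Int) (N a : Int) (h : (lst.length : Int) ≤ a) :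
    pvT lst N a = [] := by
  simp [pvT, PySem.List.pyRange_one_eq_nil h]

lemma pvT_cons_pos (lst : List Int) (N a : Int) (h : a < (lst.length : Int))
    (hq : PySem.List.pyGetD lst a 0 = N) : pvT lst N a = a :: pvT lst N (a + 1) := by
  simp [pvT, PySem.List.pyRange_one_cons h, hq]

lemma pvT_cons_neg (lst : List Int) (N a : Int) (h : a < (lst.length : Int))
    (hq : ¬ PySem.List.pyGetD lst a 0 = N) : pvT lst N a = pvT lst N (a + 1) := by
  simp [pvT, PySem.List.pyRange_one_cons h, hq]

lemma pv_filter_take1 (lst : List Int) (N : Int) :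
    ∀ (k : Nat) (a : Int), 0 ≤ a → (lst.length : Int) - a ≤ (k : Int) →
    (PySem.List.pyRange a lst.length 1).filter
        (fun e => decide (PySem.List.pyGetD lst e 0 = N ∧
          N ∉ PySem.List.slice lst (some a) (some e)))
      = (pvT lst N a).take 1 := by
  intro k
  induction k with
  | zero =>
    intro a ha hk
    rw [PySem.List.pyRange_one_eq_nil (by exact_mod_cast by omega), pvT_eq_nil lst N a (by exact_mod_cast by omega)]
    rfl
  | succ k ih =>
    intro a ha hk
    by_cases hlen : (lst.length : Int) ≤ a
    · rw [PySem.List.pyRange_one_eq_nil hlen, pvT_eq_nil lst N a hlen]; rfl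
    · rw [not_le] at hlen
      rw [PySem.List.pyRange_one_cons hlen, List.filter_cons]
      have hslice_nil : PySem.List.slice lst (some a) (some a) = [] := by
        rw [PySem.List.slice_toNat lst ha ha]; simp
      by_cases hq : PySem.List.pyGetD lst a 0 = N
      · have hrest : (PySem.List.pyRange (a + 1) lst.length 1).filter
            (fun e => decide (PySem.List.pyGetD lst e 0 = N ∧
              N ∉ PySem.List.slice lst (some a) (some e))) = [] := by
          rw [List.filter_eq_nil_iff]
          intro e he
          have hee := PySem.List.mem_pyRange_one.mp he
          have hmem : N ∈ PySem.List.slice lst (some a) (some e) :=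
            (pv_mem_slice lst N a e ha (by omega) (by omega)).mpr ⟨a, le_refl a, by omega, hq⟩
          simp [hmem]
        rw [hrest, pvT_cons_pos lst N a hlen hq]
        simp [hq, hslice_nil]
      · have hcong : (PySem.List.pyRange (a + 1) lst.length 1).filter
            (fun e => decide (PySem.List.pyGetD lst e 0 = N ∧
              N ∉ PySem.List.slice lst (some a) (some e)))
            = (PySem.List.pyRange (a + 1) lst.length 1).filter
            (fun e => decide (PySem.List.pyGetD lst e 0 = N ∧
              N ∉ PySem.List.slice lst (some (a + 1)) (some e))) := by
          apply List.filter_congr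
          intro e he
          have hee := PySem.List.mem_pyRange_one.mp he
          have hiff : (N ∈ PySem.List.slice lst (some a) (some e)) ↔
              (N ∈ PySem.List.slice lst (some (a + 1)) (some e)) := by
            rw [pv_mem_slice lst N a e ha (by omega) (by omega),
              pv_mem_slice lst N (a + 1) e (by omega) (by omega) (by omega)]
            constructor
            · rintro ⟨j, hj1, hj2, hj3⟩
              rcases eq_or_lt_of_le hj1 with h | h
              · exact absurd (h ▸ hj3) hq
              · exact ⟨j, by omega, hj2, hj3⟩
            · rintro ⟨j, hj1, hj2, hj3⟩; exact ⟨j, by omega, hj2, hj3⟩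
          simp [hiff]
        rw [hcong, pvT_cons_neg lst N a hlen hq]
        simp only [hq, false_and, decide_false]
        exact ih (a + 1) (by omega) (by push_cast at hk ⊢; omega)


lemma pv_zip (lst : List Int) (N : Int) (f : Int → Int → List Int) :
    ∀ (k : Nat) (a : Int), 0 ≤ a → (lst.length : Int) - a ≤ (k : Int) →
    (pvT lst N a).flatMap (fun s => ((pvT lst N (s + 1)).take 1).map (f s))
      = ((pvT lst N a).zip (pvT lst N a).tail).map (fun p => f p.1 p.2) := by
  intro k
  induction k with
  | zero =>
    intro a ha hk
    rw [pvT_eq_nil lst N a (by exact_mod_cast by omega)]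
    rfl
  | succ k ih =>
    intro a ha hk
    by_cases hlen : (lst.length : Int) ≤ a
    · rw [pvT_eq_nil lst N a hlen]; rfl
    · rw [not_le] at hlen
      by_cases hq : PySem.List.pyGetD lst a 0 = N
      · rw [pvT_cons_pos lst N a hlen hq]
        rw [List.flatMap_cons]
        have ihr := ih (a + 1) (by omega) (by push_cast at hk ⊢; omega)
        cases ht : pvT lst N (a + 1) with
        | nil => simp [ht] at ihr ⊢
        | cons e r =>
          rw [ht] at ihr
          simp only [List.tail_cons, List.zip_cons_cons, List.map_cons, List.take_succ_cons,
            List.take_zero, List.map_cons, List.map_nil]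
          rw [ihr]
          simp
      · rw [pvT_cons_neg lst N a hlen hq]
        exact ih (a + 1) (by omega) (by push_cast at hk ⊢; omega)


lemma pv_sublists (lst : List Int) (N : Int) :
    (PySem.List.pyRange 0 (lst.length : Int) 1).foldl (fun acc start =>
      if PySem.List.pyGetD lst start 0 = N then
        (PySem.List.pyRange (start + 1) (lst.length : Int) 1).foldl (fun acc2 e =>
          if PySem.List.pyGetD lst e 0 = N then
            if N ∉ PySem.List.slice lst (some (start + 1)) (some e) then
              acc2 ++ [PySem.List.slice lst (some start) (some (e + 1))]
            else acc2
          else acc2) acc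
      else acc) []
    = ((pvT lst N 0).zip (pvT lst N 0).tail).map
        (fun p => PySem.List.slice lst (some p.1) (some (p.2 + 1))) := by
  have hbody : ∀ (start : Int) (acc2 : List (List Int)) (e : Int),
      (if PySem.List.pyGetD lst e 0 = N then
        if N ∉ PySem.List.slice lst (some (start + 1)) (some e) then
          acc2 ++ [PySem.List.slice lst (some start) (some (e + 1))]
        else acc2
      else acc2)
      = (if (PySem.List.pyGetD lst e 0 = N ∧
            N ∉ PySem.List.slice lst (some (start + 1)) (some e)) then
          acc2 ++ [PySem.List.slice lst (some start) (some (e + 1))]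
        else acc2) := by
    intro start acc2 e
    by_cases h1 : PySem.List.pyGetD lst e 0 = N <;>
      by_cases h2 : N ∉ PySem.List.slice lst (some (start + 1)) (some e) <;>
      simp [h1, h2]
  simp only [hbody]
  rw [PySem.List.foldl_ite_eq_foldl_filter
    (p := fun start => PySem.List.pyGetD lst start 0 = N)
    (f := fun acc start =>
      (PySem.List.pyRange (start + 1) (lst.length : Int) 1).foldl (fun acc2 e =>
        if (PySem.List.pyGetD lst e 0 = N ∧
            N ∉ PySem.List.slice lst (some (start + 1)) (some e)) then
          acc2 ++ [PySem.List.slice lst (some start) (some (e + 1))]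
        else acc2) acc)]
  have hT0 : (PySem.List.pyRange 0 (lst.length : Int) 1).filter
      (fun x => decide (PySem.List.pyGetD lst x 0 = N)) = pvT lst N 0 := rfl
  rw [hT0]
  have hinner : ∀ (acc : List (List Int)) (start : Int), start ∈ pvT lst N 0 →
      (PySem.List.pyRange (start + 1) (lst.length : Int) 1).foldl (fun acc2 e =>
        if (PySem.List.pyGetD lst e 0 = N ∧
            N ∉ PySem.List.slice lst (some (start + 1)) (some e)) then
          acc2 ++ [PySem.List.slice lst (some start) (some (e + 1))]
        else acc2) acc
      = acc ++ ((pvT lst N (start + 1)).take 1).map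
          (fun e => PySem.List.slice lst (some start) (some (e + 1))) := by
    intro acc start hstart
    have hb := pvT_mem lst N 0 start hstart
    rw [PySem.List.foldl_append_ite
      (p := fun e => PySem.List.pyGetD lst e 0 = N ∧
        N ∉ PySem.List.slice lst (some (start + 1)) (some e))
      (f := fun e => PySem.List.slice lst (some start) (some (e + 1)))]
    rw [pv_filter_take1 lst N lst.length (start + 1) (by omega) (by omega)]
  rw [PySem.List.foldl_congr_mem _ _ _ _ hinner]
  rw [PySem.List.foldl_append_eq_flatMap]
  rw [pv_zip lst N (fun s e => PySem.List.slice lst (some s) (some (e + 1)))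
    lst.length 0 (by omega) (by omega)]
  rfl


lemma pv_idx_head (lst : List Int) (N : Int) :
    ∀ (k : Nat) (a : Int), 0 ≤ a → (lst.length : Int) - a ≤ (k : Int) →
    pvIndexFrom lst N a.toNat = (pvT lst N a).head?.map Int.toNat := by
  intro k
  induction k with
  | zero =>
    intro a ha hk
    rw [pvT_eq_nil lst N a (by exact_mod_cast by omega)]
    unfold pvIndexFrom
    rw [List.drop_eq_nil_of_le (by omega : lst.length ≤ a.toNat)]
    rfl
  | succ k ih =>
    intro a ha hk
    by_cases hlen : (lst.length : Int) ≤ a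
    · rw [pvT_eq_nil lst N a hlen]
      unfold pvIndexFrom
      rw [List.drop_eq_nil_of_le (by omega : lst.length ≤ a.toNat)]
      rfl
    · rw [not_le] at hlen
      have hlt : a.toNat < lst.length := by omega
      have hget : PySem.List.pyGetD lst a 0 = lst[a.toNat] :=
        PySem.List.pyGetD_eq_getElem lst 0 ha (by omega)
      unfold pvIndexFrom
      rw [List.drop_eq_getElem_cons hlt, List.idxOf?_cons]
      by_cases hq : PySem.List.pyGetD lst a 0 = N
      · have hbeq : (lst[a.toNat] == N) = true := by
          rw [← hget]; exact beq_iff_eq.mpr hq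
        rw [pvT_cons_pos lst N a hlen hq, if_pos hbeq]
        simp
      · have hbeq : ¬ ((lst[a.toNat] == N) = true) := by
          rw [← hget]; exact fun h => hq (beq_iff_eq.mp h)
        rw [pvT_cons_neg lst N a hlen hq, if_neg hbeq]
        have ihr := ih (a + 1) (by omega) (by push_cast at hk ⊢; omega)
        unfold pvIndexFrom at ihr
        have hton : (a + 1).toNat = a.toNat + 1 := by omega
        rw [hton] at ihr
        rw [← ihr, Option.map_map]
        apply congrFun
        apply congrArg
        funext x
        simp [Function.comp]
        omega

lemma pv_chain (lst : List Int) (N : Int) :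
    ∀ (k : Nat) (a : Int), 0 ≤ a → (lst.length : Int) - a ≤ (k : Int) →
    ∀ s rest, pvT lst N a = s :: rest → pvT lst N (s + 1) = rest := by
  intro k
  induction k with
  | zero =>
    intro a ha hk s rest h
    rw [pvT_eq_nil lst N a (by exact_mod_cast by omega)] at h
    cases h
  | succ k ih =>
    intro a ha hk s rest h
    by_cases hlen : (lst.length : Int) ≤ a
    · rw [pvT_eq_nil lst N a hlen] at h; cases h
    · rw [not_le] at hlen
      by_cases hq : PySem.List.pyGetD lst a 0 = N
      · rw [pvT_cons_pos lst N a hlen hq] at h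
        obtain ⟨h1, h2⟩ := List.cons.injEq .. ▸ h
        subst h1; subst h2; rfl
      · rw [pvT_cons_neg lst N a hlen hq] at h
        exact ih (a + 1) (by omega) (by push_cast at hk ⊢; omega) s rest h

lemma pv_collect (lst : List Int) (N : Int) :
    ∀ (fuel : Nat) (i : Int), -1 ≤ i → (lst.length : Int) - (i + 1) < (fuel : Int) →
    pvCollect lst N fuel i = pvT lst N (i + 1) := by
  intro fuel
  induction fuel with
  | zero =>
    intro i hi hf
    rw [pvT_eq_nil lst N (i + 1) (by exact_mod_cast by omega)]
    rfl
  | succ fuel ih =>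
    intro i hi hf
    show (match pvIndexFrom lst N (i + 1).toNat with
      | none => []
      | some j => (j : Int) :: pvCollect lst N fuel (j : Int)) = _
    rw [pv_idx_head lst N lst.length (i + 1) (by omega) (by omega)]
    cases hT : pvT lst N (i + 1) with
    | nil => rfl
    | cons s rest =>
      have hs := pvT_mem lst N (i + 1) s (by rw [hT]; simp)
      have hsnn : ((s.toNat : Int)) = s := by omega
      simp only [List.head?_cons, Option.map_some]
      rw [hsnn]
      rw [ih s (by omega) (by push_cast at hf ⊢; omega)]
      exact congrArg _ (pv_chain lst N lst.length (i + 1) (by omega)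
        (by omega) s rest hT)

lemma pv_zip_tail_lt (l : List Int) (hl : l.Pairwise (· < ·)) :
    ∀ p ∈ l.zip l.tail, p.1 < p.2 := by
  induction l with
  | nil => intro p hp; simp at hp
  | cons x t ih =>
    intro p hp
    cases t with
    | nil => simp at hp
    | cons e r =>
      simp only [List.tail_cons, List.zip_cons_cons] at hp
      rcases List.mem_cons.mp hp with h | h
      · subst h
        exact (List.pairwise_cons.mp hl).1 e (by simp)
      · exact ih (List.pairwise_cons.mp hl).2 p h

lemma pv_pairs_mem (lst : List Int) (N : Int) (p : Int × Int)
    (hp : p ∈ (pvT lst N 0).zip (pvT lst N 0).tail) :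
    0 ≤ p.1 ∧ p.1 < p.2 ∧ p.2 < (lst.length : Int) := by
  obtain ⟨a, b⟩ := p
  obtain ⟨h1, h2⟩ := List.of_mem_zip hp
  have hb := pvT_mem lst N 0 b (List.mem_of_mem_tail h2)
  have ha := pvT_mem lst N 0 a h1
  have hpw : (pvT lst N 0).Pairwise (· < ·) :=
    List.Pairwise.filter _ (PySem.List.pairwise_lt_pyRange_one 0 lst.length)
  exact ⟨ha.1, pv_zip_tail_lt _ hpw _ hp, hb.2.1⟩

lemma pv_len_slice (lst : List Int) (a b : Int) (h0 : 0 ≤ a) (hab : a < b)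
    (hb : b < (lst.length : Int)) :
    (PySem.List.slice lst (some a) (some (b + 1))).length = (b - a + 1).toNat := by
  rw [PySem.List.slice_toNat lst h0 (by omega)]
  simp only [List.length_take, List.length_drop]
  omega

lemma pv_min_map {A B : Type} (f : A → B) (key : B → Nat) (l : List A) :
    PySem.List.min? (l.map f) key = Option.map f (PySem.List.min? l (fun x => key (f x))) := by
  show (l.map f).foldl _ none = _
  rw [List.foldl_map]
  suffices h : ∀ (t : List A) (acc : Option A),
      t.foldl (fun acc x => match acc with
        | none => some (f x)
        | some m => if key (f x) < key m then some (f x) else some m) (Option.map f acc)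
      = Option.map f (t.foldl (fun acc x => match acc with
        | none => some x
        | some m => if key (f x) < key (f m) then some x else some m) acc) by
    exact h l none
  intro t
  induction t with
  | nil => intro acc; rfl
  | cons x t ih =>
    intro acc
    cases acc with
    | none => exact ih (some x)
    | some m =>
      simp only [List.foldl_cons, Option.map_some]
      by_cases h : key (f x) < key (f m) <;> simp only [h, if_true, if_false] <;>
        [exact ih (some x); exact ih (some m)]


lemma pv_max_map {A B : Type} (f : A → B) (key : B → Nat) (l : List A) :
    PySem.List.max? (l.map f) key = Option.map f (PySem.List.max? l (fun x => key (f x))) := by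
  show (l.map f).foldl _ none = _
  rw [List.foldl_map]
  suffices h : ∀ (t : List A) (acc : Option A),
      t.foldl (fun acc x => match acc with
        | none => some (f x)
        | some m => if key m < key (f x) then some (f x) else some m) (Option.map f acc)
      = Option.map f (t.foldl (fun acc x => match acc with
        | none => some x
        | some m => if key (f m) < key (f x) then some x else some m) acc) by
    exact h l none
  intro t
  induction t with
  | nil => intro acc; rfl
  | cons x t ih =>
    intro acc
    cases acc with
    | none => exact ih (some x)
    | some m =>
      simp only [List.foldl_cons, Option.map_some]
      by_cases h : key (f m) < key (f x) <;> simp only [h, if_true, if_false] <;>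
        [exact ih (some x); exact ih (some m)]


lemma pv_min_congr {A : Type} (k1 : A → Nat) (k2 : A → Int) (l : List A)
    (h : ∀ x ∈ l, ∀ y ∈ l, (k1 x < k1 y ↔ k2 x < k2 y)) :
    PySem.List.min? l k1 = PySem.List.min? l k2 := by
  have aux : ∀ (t : List A), (∀ x ∈ t, x ∈ l) → ∀ (m : A), m ∈ l →
      t.foldl (fun acc x => match acc with
        | none => some x
        | some mm => if k1 x < k1 mm then some x else some mm) (some m)
      = t.foldl (fun acc x => match acc with
        | none => some x
        | some mm => if k2 x < k2 mm then some x else some mm) (some m) := by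
    intro t
    induction t with
    | nil => intro _ m _; rfl
    | cons y t ih =>
      intro hsub m hm
      have hy : y ∈ l := hsub y (by simp)
      have hiff := h y hy m hm
      simp only [List.foldl_cons]
      by_cases hc : k1 y < k1 m
      · rw [if_pos hc, if_pos (hiff.mp hc)]
        exact ih (fun x hx => hsub x (by simp [hx])) y hy
      · rw [if_neg hc, if_neg (fun hc2 => hc (hiff.mpr hc2))]
        exact ih (fun x hx => hsub x (by simp [hx])) m hm
  cases l with
  | nil => rfl
  | cons x t =>
    show (x :: t).foldl _ none = (x :: t).foldl _ none
    simp only [List.foldl_cons]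
    exact aux t (fun z hz => by simp [hz]) x (by simp)


lemma pv_max_congr {A : Type} (k1 : A → Nat) (k2 : A → Int) (l : List A)
    (h : ∀ x ∈ l, ∀ y ∈ l, (k1 x < k1 y ↔ k2 x < k2 y)) :
    PySem.List.max? l k1 = PySem.List.max? l k2 := by
  have aux : ∀ (t : List A), (∀ x ∈ t, x ∈ l) → ∀ (m : A), m ∈ l →
      t.foldl (fun acc x => match acc with
        | none => some x
        | some mm => if k1 mm < k1 x then some x else some mm) (some m)
      = t.foldl (fun acc x => match acc with
        | none => some x
        | some mm => if k2 mm < k2 x then some x else some mm) (some m) := by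
    intro t
    induction t with
    | nil => intro _ m _; rfl
    | cons y t ih =>
      intro hsub m hm
      have hy : y ∈ l := hsub y (by simp)
      have hiff := h m hm y hy
      simp only [List.foldl_cons]
      by_cases hc : k1 m < k1 y
      · rw [if_pos hc, if_pos (hiff.mp hc)]
        exact ih (fun x hx => hsub x (by simp [hx])) y hy
      · rw [if_neg hc, if_neg (fun hc2 => hc (hiff.mpr hc2))]
        exact ih (fun x hx => hsub x (by simp [hx])) m hm
  cases l with
  | nil => rfl
  | cons x t =>
    show (x :: t).foldl _ none = (x :: t).foldl _ none
    simp only [List.foldl_cons]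
    exact aux t (fun z hz => by simp [hz]) x (by simp)


-- ===== VERDICT (by name: the statement is the Claim_ definition above) =====
theorem find_shortest_longest_sublists_spec : Claim_equal_find_shortest_longest_sublists := by
  intro lst N _
  unfold Spec_find_shortest_longest_sublists
  simp only [find_shortest_longest_sublists, find_shortest_longest_sublists_alt]
  rw [pv_sublists lst N]
  rw [pv_collect lst N (lst.length + 1) (-1) (by omega) (by push_cast; omega)]
  rw [show ((-1 : Int) + 1) = 0 from by norm_num]
  rw [PySem.List.slice_from_one]
  rw [PySem.List.foldl_prod_mk
    (f := fun (acc : Option (Int × Int)) (p : Int × Int) => match acc with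
      | none => some p
      | some m => if p.2 - p.1 < m.2 - m.1 then some p else some m)
    (g := fun (acc : Option (Int × Int)) (p : Int × Int) => match acc with
      | none => some p
      | some m => if m.2 - m.1 < p.2 - p.1 then some p else some m)]
  have hmin : ((pvT lst N 0).zip (pvT lst N 0).tail).foldl
      (fun (acc : Option (Int × Int)) (p : Int × Int) => match acc with
        | none => some p
        | some m => if p.2 - p.1 < m.2 - m.1 then some p else some m) none
      = PySem.List.min? ((pvT lst N 0).zip (pvT lst N 0).tail)
          (fun p => p.2 - p.1) := by
    unfold PySem.List.min?
    exact PySem.List.foldl_congr_mem _ _ _ _ (fun acc x _ => by cases acc <;> rfl)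
  have hmax : ((pvT lst N 0).zip (pvT lst N 0).tail).foldl
      (fun (acc : Option (Int × Int)) (p : Int × Int) => match acc with
        | none => some p
        | some m => if m.2 - m.1 < p.2 - p.1 then some p else some m) none
      = PySem.List.max? ((pvT lst N 0).zip (pvT lst N 0).tail)
          (fun p => p.2 - p.1) := by
    unfold PySem.List.max?
    exact PySem.List.foldl_congr_mem _ _ _ _ (fun acc x _ => by cases acc <;> rfl)
  rw [hmin, hmax]
  by_cases hne : (pvT lst N 0).zip (pvT lst N 0).tail = []
  · rw [hne]; rfl
  · have hkey : ∀ x ∈ (pvT lst N 0).zip (pvT lst N 0).tail,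
        ∀ y ∈ (pvT lst N 0).zip (pvT lst N 0).tail,
        ((fun q : Int × Int =>
            (PySem.List.slice lst (some q.1) (some (q.2 + 1))).length) x
          < (fun q : Int × Int =>
            (PySem.List.slice lst (some q.1) (some (q.2 + 1))).length) y
          ↔ (fun q : Int × Int => q.2 - q.1) x < (fun q : Int × Int => q.2 - q.1) y) := by
      intro x hx y hy
      obtain ⟨hx1, hx2, hx3⟩ := pv_pairs_mem lst N x hx
      obtain ⟨hy1, hy2, hy3⟩ := pv_pairs_mem lst N y hy
      simp only
      rw [pv_len_slice lst x.1 x.2 hx1 hx2 hx3, pv_len_slice lst y.1 y.2 hy1 hy2 hy3]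
      omega
    rw [pv_min_map (fun q : Int × Int =>
        PySem.List.slice lst (some q.1) (some (q.2 + 1))) List.length,
      pv_max_map (fun q : Int × Int =>
        PySem.List.slice lst (some q.1) (some (q.2 + 1))) List.length,
      pv_min_congr _ _ _ hkey, pv_max_congr _ _ _ hkey]
    have hie : (((pvT lst N 0).zip (pvT lst N 0).tail).map (fun q : Int × Int =>
        PySem.List.slice lst (some q.1) (some (q.2 + 1)))).isEmpty = false := by
      simp [hne]
    rw [hie]
    cases hm : PySem.List.min? ((pvT lst N 0).zip (pvT lst N 0).tail)
        (fun q : Int × Int => q.2 - q.1) with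
    | none => exact absurd ((PySem.List.min?_eq_none_iff _ _).mp hm) hne
    | some s =>
      cases hM : PySem.List.max? ((pvT lst N 0).zip (pvT lst N 0).tail)
          (fun q : Int × Int => q.2 - q.1) with
      | none => exact absurd ((PySem.List.max?_eq_none_iff _ _).mp hM) hne
      | some l => rfl
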